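-- pv_equiv track=rewrite | github.com/JohnnyBasar/QWERA | qwera_tools/algorithms/DWD_Matrix_Creater_v2.py | _parse_month_list
-- ===== SOURCE A (Python) =====
-- def _parse_month_list(month_str: str):
--     months = []
--     if month_str:
--         for t in month_str.split(','):
--             t = t.strip()
--             if t:
--                 m = int(t)
--                 if 1 <= m <= 12:
--                     months.append(m)
--     return sorted(set(months))
-- ===== SOURCE B (Python) =====
-- def _parse_month_list(month_str: str):
--     # Recursive descent over the token list with an incrementally maintained
--     # sorted, duplicate-free accumulator (ordered insertion), so the result is
--     # already sorted and deduplicated when the recursion bottoms out -- no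
--     # sorted() and no set().
--     if not month_str:
--         return []
--     return _collect(month_str.split(','), [])
--
-- def _collect(tokens, acc):
--     if not tokens:
--         return acc
--     t = tokens[0].strip()
--     if t:
--         m = int(t)
--         if 1 <= m <= 12:
--             acc = _insort(acc, m)
--     return _collect(tokens[1:], acc)
--
-- def _insort(ms, m):
--     # insert m into the strictly increasing list ms, dropping duplicates
--     if not ms or m < ms[0]:
--         return [m] + ms
--     if m == ms[0]:
--         return ms
--     return [ms[0]] + _insort(ms[1:], m)
-- ===== Notes on version B (the rewrite author's own statement) =====
-- stated objective: alternative
-- what changed: B is a recursive descent over the token list that maintains a strictly increasing duplicate-free accumulator by ordered insertion, so the answer is sorted and deduplicated incrementally instead of collecting a list and calling sorted(set(...)) at the end.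
import Mathlib
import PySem

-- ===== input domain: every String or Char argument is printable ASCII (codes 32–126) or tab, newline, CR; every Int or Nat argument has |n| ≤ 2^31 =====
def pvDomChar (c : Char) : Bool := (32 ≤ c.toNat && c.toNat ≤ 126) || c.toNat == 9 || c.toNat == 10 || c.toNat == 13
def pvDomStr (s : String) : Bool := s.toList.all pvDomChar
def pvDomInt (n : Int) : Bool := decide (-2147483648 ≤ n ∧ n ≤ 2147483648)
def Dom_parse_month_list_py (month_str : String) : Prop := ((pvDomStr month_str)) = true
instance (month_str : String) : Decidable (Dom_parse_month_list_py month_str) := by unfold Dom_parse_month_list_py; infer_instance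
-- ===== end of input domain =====

-- B keeps a strictly increasing duplicate-free accumulator via recursive ordered insertion instead of sorted(set(...)); return values proved equal wherever A returns.

-- ===== PORT A =====
def pvStepA (acc : List Int) (t : String) : List Int :=
  if PySem.Str.strip t ≠ "" then
    match PySem.Int.ofStr? (PySem.Str.strip t) with
    | some m => if 1 ≤ m ∧ m ≤ 12 then acc ++ [m] else acc
    | none => acc   -- Python raises ValueError here; excluded by Pre_
  else acc

def parse_month_list_py (month_str : String) : List Int :=
  let months : List Int :=
    if month_str ≠ "" then ((PySem.Str.split? month_str ",").getD []).foldl pvStepA []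
    else []
  PySem.List.sorted (PySem.Set.ofList months) (fun x => x) false

-- ===== PORT B =====
def pvInsort (ms : List Int) (m : Int) : List Int :=
  match ms with
  | [] => [m]
  | x :: t => if m < x then m :: x :: t else if m = x then x :: t else x :: pvInsort t m

def pvCollect (tokens : List String) (acc : List Int) : List Int :=
  match tokens with
  | [] => acc
  | t :: rest =>
    if PySem.Str.strip t ≠ "" then
      match PySem.Int.ofStr? (PySem.Str.strip t) with
      | some m => pvCollect rest (if 1 ≤ m ∧ m ≤ 12 then pvInsort acc m else acc)
      | none => pvCollect rest acc   -- Python raises ValueError here; excluded by Pre_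
    else pvCollect rest acc

def parse_month_list_py_alt (month_str : String) : List Int :=
  if month_str ≠ "" then pvCollect ((PySem.Str.split? month_str ",").getD []) []
  else []

-- ===== PRECONDITION & SPEC =====
-- Pre_ excludes exactly the inputs where some non-empty stripped token is not int()-parseable: there A (and B alike) raise ValueError.
def Pre_parse_month_list_py (month_str : String) : Prop :=
  ∀ t ∈ (PySem.Str.split? month_str ",").getD [],
    PySem.Str.strip t = "" ∨ (PySem.Int.ofStr? (PySem.Str.strip t)).isSome = true
instance (month_str : String) : Decidable (Pre_parse_month_list_py month_str) := by unfold Pre_parse_month_list_py; infer_instance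

def pvWitness_parse_month_list_py : String := " 5 ,5,12, 0, 13"

def Spec_parse_month_list_py (month_str : String) (out : List Int) : Prop := out = parse_month_list_py_alt month_str
instance (month_str : String) (out : List Int) : Decidable (Spec_parse_month_list_py month_str out) := by unfold Spec_parse_month_list_py; infer_instance

-- ===== CLAIM (what is proved, stated in full; the proofs are below) =====
def Claim_equal_parse_month_list_py : Prop := ∀ (month_str : String), Dom_parse_month_list_py month_str → Pre_parse_month_list_py month_str → Spec_parse_month_list_py month_str (parse_month_list_py month_str)

-- ===== LEMMAS AND PROOFS =====

theorem pv_mem_insort (ms : List Int) (m x : Int) :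
    x ∈ pvInsort ms m ↔ x = m ∨ x ∈ ms := by
  induction ms with
  | nil => simp [pvInsort]
  | cons y t ih =>
    simp only [pvInsort]
    split_ifs with h1 h2
    · simp
    · subst h2; simp
    · simp [ih]; tauto

theorem pv_pairwise_insort (ms : List Int) (m : Int)
    (h : ms.Pairwise (· < ·)) : (pvInsort ms m).Pairwise (· < ·) := by
  induction ms with
  | nil => simp [pvInsort]
  | cons y t ih =>
    rcases List.pairwise_cons.1 h with ⟨hy, ht⟩
    simp only [pvInsort]
    split_ifs with h1 h2
    · refine List.pairwise_cons.2 ⟨?_, h⟩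
      intro z hz
      rcases List.mem_cons.1 hz with hz | hz
      · omega
      · exact lt_trans h1 (hy z hz)
    · exact h
    · refine List.pairwise_cons.2 ⟨?_, ih ht⟩
      intro z hz
      rcases (pv_mem_insort t m z).1 hz with hz | hz
      · omega
      · exact hy z hz

-- reductions of A's step on a single token
theorem pvStepA_blank (acc : List Int) (t : String)
    (h1 : ¬ PySem.Str.strip t ≠ "") : pvStepA acc t = acc := by
  simp only [pvStepA, if_neg h1]

theorem pvStepA_none (acc : List Int) (t : String)
    (h1 : PySem.Str.strip t ≠ "")
    (hof : PySem.Int.ofStr? (PySem.Str.strip t) = none) : pvStepA acc t = acc := by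
  simp only [pvStepA, if_pos h1, hof]

theorem pvStepA_in (acc : List Int) (t : String) (v : Int)
    (h1 : PySem.Str.strip t ≠ "")
    (hof : PySem.Int.ofStr? (PySem.Str.strip t) = some v)
    (h2 : 1 ≤ v ∧ v ≤ 12) : pvStepA acc t = acc ++ [v] := by
  simp only [pvStepA, if_pos h1, hof, if_pos h2]

theorem pvStepA_out (acc : List Int) (t : String) (v : Int)
    (h1 : PySem.Str.strip t ≠ "")
    (hof : PySem.Int.ofStr? (PySem.Str.strip t) = some v)
    (h2 : ¬ (1 ≤ v ∧ v ≤ 12)) : pvStepA acc t = acc := by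
  simp only [pvStepA, if_pos h1, hof, if_neg h2]

-- B's accumulator tracks the members of A's accumulator through each token
theorem pv_mem_collect (ts : List String) (acc : List Int) (accA : List Int)
    (h : ∀ x : Int, x ∈ acc ↔ x ∈ accA) :
    ∀ x : Int, x ∈ pvCollect ts acc ↔ x ∈ ts.foldl pvStepA accA := by
  induction ts generalizing acc accA with
  | nil => simpa using h
  | cons t ts ih =>
    simp only [List.foldl_cons, pvCollect]
    split_ifs with h1
    · cases hof : PySem.Int.ofStr? (PySem.Str.strip t) with
      | none =>
        dsimp only
        rw [pvStepA_none accA t h1 hof]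
        exact ih _ _ h
      | some v =>
        dsimp only
        split_ifs with h2
        · rw [pvStepA_in accA t v h1 hof h2]
          refine ih _ _ ?_
          intro x
          rw [pv_mem_insort]
          simp [h x, or_comm]
        · rw [pvStepA_out accA t v h1 hof h2]
          exact ih _ _ h
    · rw [pvStepA_blank accA t h1]
      exact ih _ _ h

theorem pv_pairwise_collect (ts : List String) (acc : List Int)
    (h : acc.Pairwise (· < ·)) : (pvCollect ts acc).Pairwise (· < ·) := by
  induction ts generalizing acc with
  | nil => simpa using h
  | cons t ts ih =>
    simp only [pvCollect]
    split_ifs with h1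
    · cases hof : PySem.Int.ofStr? (PySem.Str.strip t) with
      | none => exact ih _ h
      | some v =>
        dsimp only
        split_ifs with h2
        · exact ih _ (pv_pairwise_insort _ _ h)
        · exact ih _ h
    · exact ih _ h

-- sorted(set(M)) equals any strictly increasing list with M's members
theorem pv_sorted_eq (M B : List Int)
    (hmem : ∀ x : Int, x ∈ B ↔ x ∈ M)
    (hp : B.Pairwise (· < ·)) :
    PySem.List.sorted (PySem.Set.ofList M) (fun x => x) false = B := by
  apply PySem.List.sorted_eq_of_perm_of_pairwise_lt
  · rw [List.perm_ext_iff_of_nodup (hp.imp ne_of_lt) (PySem.Set.nodup_ofList M)]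
    intro x
    rw [PySem.Set.mem_ofList, hmem]
  · exact hp

-- ===== VERDICT (by name: the statement is the Claim_ definition above) =====
theorem parse_month_list_py_spec : Claim_equal_parse_month_list_py := by
  intro s _ _
  unfold Spec_parse_month_list_py parse_month_list_py parse_month_list_py_alt
  by_cases hs : s = ""
  · subst hs; rfl
  · rw [if_pos hs, if_pos hs]
    exact pv_sorted_eq _ _
      (pv_mem_collect _ [] [] (by simp))
      (pv_pairwise_collect _ [] (by simp))
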